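-- pv_equiv track=rewrite | github.com/chriskamphuis/ASR | scripts/read_timit.py | split_development_test
-- ===== SOURCE A (Python) =====
-- test_speakers = {
--     "MDAB0", "MWBT0", "FELC0",
--     "MTAS1", "MWEW0", "FPAS0",
--     "MJMP0", "MLNT0", "FPKT0",
--     "MLLL0", "MTLS0", "FJLM0",
--     "MBPM0", "MKLT0", "FNLP0",
--     "MCMJ0", "MJDH0", "FMGD0",
--     "MGRT0", "MNJM0", "FDHC0",
--     "MJLN0", "MPAM0", "FMLD0"
-- }
--
-- validation_speakers = {
--     "FAKS0", "FDAC1", "FJEM0", "MGWT0", "MJAR0",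
--     "MMDB1", "MMDM2", "MPDF0", "FCMH0", "FKMS0",
--     "MBDG0", "MBWM0", "MCSH0", "FADG0", "FDMS0",
--     "FEDW0", "MGJF0", "MGLB0", "MRTK0", "MTAA0",
--     "MTDT0", "MTHC0", "MWJG0", "FNMR0", "FREW0",
--     "FSEM0", "MBNS0", "MMJR0", "MDLS0", "MDLF0",
--     "MDVC0", "MERS0", "FMAH0", "FDRW0", "MRCS0",
--     "MRJM4", "FCAL1", "MMWH0", "FJSJ0", "MAJC0",
--     "MJSW0", "MREB0", "FGJD0", "FJMG0", "MROA0",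
--     "MTEB0", "MJFC0", "MRJR0", "FMML0", "MRWS1"
-- }
--
-- def split_development_test(test_data):
--     validation_keys = []
--     core_test_keys = []
--     full_test_keys = []
--     for key in test_data.keys():
--         if key[8:10] == 'SA':
--             continue
--         if key[3:8] in test_speakers:
--             core_test_keys.append(key)
--             full_test_keys.append(key)
--         elif key[3:8] in validation_speakers:
--             validation_keys.append(key)
--         else:
--             full_test_keys.append(key)
--     return validation_keys, core_test_keys, full_test_keys
-- ===== SOURCE B (Python) =====
-- test_speakers = {
--     "MDAB0", "MWBT0", "FELC0",
--     "MTAS1", "MWEW0", "FPAS0",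
--     "MJMP0", "MLNT0", "FPKT0",
--     "MLLL0", "MTLS0", "FJLM0",
--     "MBPM0", "MKLT0", "FNLP0",
--     "MCMJ0", "MJDH0", "FMGD0",
--     "MGRT0", "MNJM0", "FDHC0",
--     "MJLN0", "MPAM0", "FMLD0"
-- }
--
-- validation_speakers = {
--     "FAKS0", "FDAC1", "FJEM0", "MGWT0", "MJAR0",
--     "MMDB1", "MMDM2", "MPDF0", "FCMH0", "FKMS0",
--     "MBDG0", "MBWM0", "MCSH0", "FADG0", "FDMS0",
--     "FEDW0", "MGJF0", "MGLB0", "MRTK0", "MTAA0",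
--     "MTDT0", "MTHC0", "MWJG0", "FNMR0", "FREW0",
--     "FSEM0", "MBNS0", "MMJR0", "MDLS0", "MDLF0",
--     "MDVC0", "MERS0", "FMAH0", "FDRW0", "MRCS0",
--     "MRJM4", "FCAL1", "MMWH0", "FJSJ0", "MAJC0",
--     "MJSW0", "MREB0", "FGJD0", "FJMG0", "MROA0",
--     "MTEB0", "MJFC0", "MRJR0", "FMML0", "MRWS1"
-- }
--
-- def split_development_test(test_data):
--     # one pre-filter pass, then each output list is its own comprehension over it;
--     # full = non-validation works because the two speaker sets are disjoint
--     filtered = [k for k in test_data.keys() if k[8:10] != 'SA']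
--     validation_keys = [k for k in filtered if k[3:8] in validation_speakers]
--     core_test_keys = [k for k in filtered if k[3:8] in test_speakers]
--     full_test_keys = [k for k in filtered if k[3:8] not in validation_speakers]
--     return validation_keys, core_test_keys, full_test_keys
-- ===== Notes on version B (the rewrite author's own statement) =====
-- stated objective: alternative
-- what changed: Replaces A's single loop with three mutated accumulators by a pre-filter of non-SA keys plus one comprehension per output list, with full-test derived as the complement of the validation set (valid because the two speaker sets are disjoint).
import Mathlib
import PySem

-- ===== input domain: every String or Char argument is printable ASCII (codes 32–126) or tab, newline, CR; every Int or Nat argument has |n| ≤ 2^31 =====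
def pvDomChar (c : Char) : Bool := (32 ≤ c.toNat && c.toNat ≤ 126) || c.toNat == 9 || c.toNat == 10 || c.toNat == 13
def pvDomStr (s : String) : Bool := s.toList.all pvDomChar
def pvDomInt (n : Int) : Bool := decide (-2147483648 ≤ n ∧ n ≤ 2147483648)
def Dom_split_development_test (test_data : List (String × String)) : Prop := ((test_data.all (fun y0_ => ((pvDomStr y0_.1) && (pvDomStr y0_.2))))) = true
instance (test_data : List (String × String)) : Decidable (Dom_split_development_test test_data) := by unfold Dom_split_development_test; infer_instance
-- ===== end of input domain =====

-- B replaces A's single loop with three mutated accumulators by a pre-filter of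
-- non-SA keys followed by one filter per output list (same cost, different decomposition).


-- ===== PORT A =====
def test_speakers : List String := PySem.Set.ofList [
    "MDAB0", "MWBT0", "FELC0",
    "MTAS1", "MWEW0", "FPAS0",
    "MJMP0", "MLNT0", "FPKT0",
    "MLLL0", "MTLS0", "FJLM0",
    "MBPM0", "MKLT0", "FNLP0",
    "MCMJ0", "MJDH0", "FMGD0",
    "MGRT0", "MNJM0", "FDHC0",
    "MJLN0", "MPAM0", "FMLD0"]

def validation_speakers : List String := PySem.Set.ofList [
    "FAKS0", "FDAC1", "FJEM0", "MGWT0", "MJAR0",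
    "MMDB1", "MMDM2", "MPDF0", "FCMH0", "FKMS0",
    "MBDG0", "MBWM0", "MCSH0", "FADG0", "FDMS0",
    "FEDW0", "MGJF0", "MGLB0", "MRTK0", "MTAA0",
    "MTDT0", "MTHC0", "MWJG0", "FNMR0", "FREW0",
    "FSEM0", "MBNS0", "MMJR0", "MDLS0", "MDLF0",
    "MDVC0", "MERS0", "FMAH0", "FDRW0", "MRCS0",
    "MRJM4", "FCAL1", "MMWH0", "FJSJ0", "MAJC0",
    "MJSW0", "MREB0", "FGJD0", "FJMG0", "MROA0",
    "MTEB0", "MJFC0", "MRJR0", "FMML0", "MRWS1"]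

-- the body of A's for-loop, acting on (validation_keys, core_test_keys, full_test_keys)
def pvStepA (acc : List String × List String × List String) (key : String) :
    List String × List String × List String :=
  if PySem.Str.slice key (some 8) (some 10) = "SA" then acc
  else if PySem.Str.slice key (some 3) (some 8) ∈ test_speakers then
    (acc.1, acc.2.1 ++ [key], acc.2.2 ++ [key])
  else if PySem.Str.slice key (some 3) (some 8) ∈ validation_speakers then
    (acc.1 ++ [key], acc.2.1, acc.2.2)
  else (acc.1, acc.2.1, acc.2.2 ++ [key])

def split_development_test (test_data : List (String × String)) :
    List String × List String × List String :=
  (PySem.Dict.ofList test_data).keys.foldl pvStepA ([], [], [])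

-- ===== PORT B =====
def split_development_test_alt (test_data : List (String × String)) :
    List String × List String × List String :=
  let filtered := (PySem.Dict.ofList test_data).keys.filter
    (fun k => decide (PySem.Str.slice k (some 8) (some 10) ≠ "SA"))
  let validation_keys := filtered.filter
    (fun k => decide (PySem.Str.slice k (some 3) (some 8) ∈ validation_speakers))
  let core_test_keys := filtered.filter
    (fun k => decide (PySem.Str.slice k (some 3) (some 8) ∈ test_speakers))
  let full_test_keys := filtered.filter
    (fun k => decide (PySem.Str.slice k (some 3) (some 8) ∉ validation_speakers))
  (validation_keys, core_test_keys, full_test_keys)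

-- ===== PRECONDITION & SPEC =====
def Spec_split_development_test (test_data : List (String × String)) (out : List String × List String × List String) : Prop := out = split_development_test_alt test_data
instance (test_data : List (String × String)) (out : List String × List String × List String) : Decidable (Spec_split_development_test test_data out) := by unfold Spec_split_development_test; infer_instance

-- ===== CLAIM (what is proved, stated in full; the proofs are below) =====
def Claim_equal_split_development_test : Prop := ∀ (test_data : List (String × String)), Dom_split_development_test test_data → Spec_split_development_test test_data (split_development_test test_data)

-- ===== LEMMAS AND PROOFS =====
set_option maxRecDepth 10000 in
theorem speakers_disjoint (s : String) (h : s ∈ test_speakers) :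
    s ∉ validation_speakers := by
  fin_cases h <;> decide

theorem foldA_filters (ks : List String) (v c f : List String) :
    ks.foldl pvStepA (v, c, f) =
      (v ++ ((ks.filter (fun k => decide (PySem.Str.slice k (some 8) (some 10) ≠ "SA"))).filter
              (fun k => decide (PySem.Str.slice k (some 3) (some 8) ∈ validation_speakers))),
       c ++ ((ks.filter (fun k => decide (PySem.Str.slice k (some 8) (some 10) ≠ "SA"))).filter
              (fun k => decide (PySem.Str.slice k (some 3) (some 8) ∈ test_speakers))),
       f ++ ((ks.filter (fun k => decide (PySem.Str.slice k (some 8) (some 10) ≠ "SA"))).filter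
              (fun k => decide (PySem.Str.slice k (some 3) (some 8) ∉ validation_speakers)))) := by
  induction ks generalizing v c f with
  | nil => simp
  | cons k ks ih =>
    by_cases hSA : PySem.Str.slice k (some 8) (some 10) = "SA"
    · simp [List.foldl_cons, pvStepA, hSA, ih]
    · by_cases hT : PySem.Str.slice k (some 3) (some 8) ∈ test_speakers
      · have hV := speakers_disjoint _ hT
        simp [List.foldl_cons, pvStepA, hSA, hT, hV, ih]
      · by_cases hV : PySem.Str.slice k (some 3) (some 8) ∈ validation_speakers
        · simp [List.foldl_cons, pvStepA, hSA, hT, hV, ih]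
        · simp [List.foldl_cons, pvStepA, hSA, hT, hV, ih]

-- ===== VERDICT (by name: the statement is the Claim_ definition above) =====
theorem split_development_test_spec : Claim_equal_split_development_test := by
  intro test_data _
  unfold Spec_split_development_test split_development_test split_development_test_alt
  simpa using foldA_filters (PySem.Dict.ofList test_data).keys [] [] []
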